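-- pv_equiv track=rewrite | github.com/Treszyk/AdventOfCode | AdventOfCode2021/Day3/SecondPuzzle/SecondPuzzle.py | get_gamma_and_epsilon_rate
-- ===== SOURCE A (Python) =====
-- def bin_to_decimal(bin_in_a_list):
--     """
--     Takes a list with bits in seperate indexes and calculates its decimal value
--     """
--     power = 0
--     decimal = 0
--
--     for bit in reversed(bin_in_a_list):
--         decimal += (2**power) * int(bit)
--         power += 1
--
--     return decimal
--
-- def get_gamma_and_epsilon_rate(bin_in_a_list):
--     """
--     Takes an bin_in_a_list and returns gamma and epsilon rates
--     """
--     gamma_rate = []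
--     epsilon_rate = []
--     for column in range(len(bin_in_a_list[0])):
--         value = 0
--
--         for row in bin_in_a_list: #
--             if(row[column] == '1'):
--                 value += 1
--             else:
--                 value -= 1
--
--         if value > 0:
--             gamma_rate.append('1')
--             epsilon_rate.append('0')
--         else:
--             gamma_rate.append('0')
--             epsilon_rate.append('1')
--
--     return bin_to_decimal(gamma_rate), bin_to_decimal(epsilon_rate)
-- ===== SOURCE B (Python) =====
-- def get_gamma_and_epsilon_rate(bin_in_a_list):
--     """
--     Takes an bin_in_a_list and returns gamma and epsilon rates
--     """
--     n = len(bin_in_a_list)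
--     gamma = 0
--     cols = 0
--     for col in zip(*bin_in_a_list):
--         gamma = gamma * 2 + (1 if 2 * col.count('1') > n else 0)
--         cols += 1
--     return gamma, ((1 << cols) - 1) - gamma
-- ===== Notes on version B (the rewrite author's own statement) =====
-- stated objective: simpler
-- what changed: B transposes the rows once (zip(*rows)), accumulates gamma directly as an integer (gamma = gamma*2 + bit) from each column's '1'-count, and derives epsilon in closed form as (1<<cols)-1-gamma, eliminating the two bit-string lists and both bin_to_decimal passes.
import Mathlib
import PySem

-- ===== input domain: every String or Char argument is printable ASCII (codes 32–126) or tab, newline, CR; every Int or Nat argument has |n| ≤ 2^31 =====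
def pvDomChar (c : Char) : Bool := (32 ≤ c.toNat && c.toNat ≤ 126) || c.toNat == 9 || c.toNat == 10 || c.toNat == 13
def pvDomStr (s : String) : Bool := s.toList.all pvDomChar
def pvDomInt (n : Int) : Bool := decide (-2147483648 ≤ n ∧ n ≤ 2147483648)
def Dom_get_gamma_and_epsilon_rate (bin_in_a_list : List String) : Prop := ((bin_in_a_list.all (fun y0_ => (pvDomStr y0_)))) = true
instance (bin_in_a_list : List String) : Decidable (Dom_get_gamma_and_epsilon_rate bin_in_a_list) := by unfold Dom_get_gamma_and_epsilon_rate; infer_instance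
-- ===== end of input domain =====

-- B replaces A's bit-string lists and bin_to_decimal passes by one integer accumulation over
-- zip-transposed columns with epsilon as the closed-form complement (objective: simpler).
-- ===== PORT A =====
-- bin_to_decimal helper of A; int(bit) ported as (ofStr? bit).getD 0 — exact here since A only
-- ever passes the strings "0" and "1", on which ofStr? is some; power stays ≥ 0 so toNat is exact.
def pvBinToDecimal (bin_in_a_list : List String) : Int :=
  (bin_in_a_list.reverse.foldl
    (fun (pd : Int × Int) bit => (pd.1 + 1, pd.2 + 2 ^ pd.1.toNat * ((PySem.Int.ofStr? bit).getD 0)))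
    (0, 0)).2

-- inner 'for row' loop of A computing value for one column; Str.pyGet? none = IndexError,
-- those inputs are excluded by Pre_ (the == then compares none with some '1' and takes the else branch)
def pvValueA (xs : List String) (column : Int) : Int :=
  xs.foldl (fun v row => if PySem.Str.pyGet? row column == some '1' then v + 1 else v - 1) 0

def get_gamma_and_epsilon_rate (bin_in_a_list : List String) : Int × Int :=
  -- len(bin_in_a_list[0]); pyGet? = none (IndexError on []) is excluded by Pre_
  let cols : Int := (((PySem.List.pyGet? bin_in_a_list 0).getD "").toList.length : Int)
  let ge := (PySem.List.pyRange 0 cols 1).foldl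
    (fun (ge : List String × List String) column =>
      if pvValueA bin_in_a_list column > 0 then (ge.1 ++ ["1"], ge.2 ++ ["0"])
      else (ge.1 ++ ["0"], ge.2 ++ ["1"]))
    ([], [])
  (pvBinToDecimal ge.1, pvBinToDecimal ge.2)

-- ===== PORT B =====
-- zip(*rows): columns until the shortest row is exhausted
def pvZipCols (rows : List (List Char)) : List (List Char) :=
  match rows with
  | [] => []
  | r :: rs =>
    if (r :: rs).any (fun c => c.isEmpty) then []
    else ((r :: rs).map (fun c => c.headD ' ')) :: pvZipCols ((r :: rs).map (fun c => c.tail))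
termination_by (rows.headD []).length
decreasing_by
  simp only [List.map_cons, List.headD_cons, List.any_cons, Bool.or_eq_true, List.isEmpty_iff] at *
  cases r with
  | nil => simp_all
  | cons a t => simp

def get_gamma_and_epsilon_rate_alt (bin_in_a_list : List String) : Int × Int :=
  let n : Int := bin_in_a_list.length
  let gc := (pvZipCols (bin_in_a_list.map String.toList)).foldl
    (fun (gc : Int × Nat) col =>
      (gc.1 * 2 + (if 2 * (PySem.List.count col '1' : Int) > n then 1 else 0), gc.2 + 1))
    (0, 0)
  (gc.1, ((1 <<< gc.2) - 1 : Int) - gc.1)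

-- ===== PRECONDITION & SPEC =====
-- Pre_ excludes exactly the inputs where A raises IndexError: the empty list (bin_in_a_list[0])
-- and lists in which some row is shorter than the first row (row[column]).
def Pre_get_gamma_and_epsilon_rate (bin_in_a_list : List String) : Prop :=
  bin_in_a_list ≠ [] ∧
  ∀ r ∈ bin_in_a_list, (bin_in_a_list.headD "").toList.length ≤ r.toList.length
instance (bin_in_a_list : List String) : Decidable (Pre_get_gamma_and_epsilon_rate bin_in_a_list) := by
  unfold Pre_get_gamma_and_epsilon_rate; infer_instance

def pvWitness_get_gamma_and_epsilon_rate : List String := ["10", "11", "01"]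

def Spec_get_gamma_and_epsilon_rate (bin_in_a_list : List String) (out : Int × Int) : Prop := out = get_gamma_and_epsilon_rate_alt bin_in_a_list
instance (bin_in_a_list : List String) (out : Int × Int) : Decidable (Spec_get_gamma_and_epsilon_rate bin_in_a_list out) := by unfold Spec_get_gamma_and_epsilon_rate; infer_instance

-- ===== CLAIM (what is proved, stated in full; the proofs are below) =====
def Claim_equal_get_gamma_and_epsilon_rate : Prop := ∀ (bin_in_a_list : List String), Dom_get_gamma_and_epsilon_rate bin_in_a_list → Pre_get_gamma_and_epsilon_rate bin_in_a_list → Spec_get_gamma_and_epsilon_rate bin_in_a_list (get_gamma_and_epsilon_rate bin_in_a_list)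

-- ===== LEMMAS AND PROOFS =====

-- the folding step of pvBinToDecimal
theorem pvBtd_aux (r : List String) :
    ∀ (p d : Int), 0 ≤ p →
      (r.foldl (fun (pd : Int × Int) bit =>
          (pd.1 + 1, pd.2 + 2 ^ pd.1.toNat * ((PySem.Int.ofStr? bit).getD 0))) (p, d)).2
      = d + 2 ^ p.toNat *
        (r.foldl (fun (pd : Int × Int) bit =>
          (pd.1 + 1, pd.2 + 2 ^ pd.1.toNat * ((PySem.Int.ofStr? bit).getD 0))) (0, 0)).2 := by
  induction r with
  | nil => intro p d _; simp
  | cons b r ih =>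
    intro p d hp
    simp only [List.foldl_cons]
    rw [ih (p + 1) _ (by omega)]
    simp only [Int.toNat_zero, pow_zero, one_mul, zero_add]
    rw [ih 1 _ (by omega)]
    have h1 : (p + 1).toNat = p.toNat + 1 := by omega
    have h2 : ((1 : Int)).toNat = 1 := rfl
    rw [h1, h2]
    ring

theorem pvBtd_append (l : List String) (b : String) :
    pvBinToDecimal (l ++ [b]) = 2 * pvBinToDecimal l + (PySem.Int.ofStr? b).getD 0 := by
  unfold pvBinToDecimal
  rw [List.reverse_append]
  simp only [List.reverse_singleton, List.singleton_append, List.foldl_cons]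
  rw [pvBtd_aux _ _ _ (by omega)]
  norm_num
  ring

-- pvZipCols on rows whose head has length m and all of whose rows have length ≥ m
theorem pvZipCols_eq (m : Nat) :
    ∀ (rows : List (List Char)), rows ≠ [] → (rows.headD []).length = m →
      (∀ r ∈ rows, m ≤ r.length) →
      pvZipCols rows = (List.range m).map (fun j => rows.map (fun r => r.getD j ' ')) := by
  induction m with
  | zero =>
    intro rows hne hhead _
    match rows with
    | r :: rs =>
      simp only [List.headD_cons] at hhead
      have : r = [] := List.eq_nil_of_length_eq_zero hhead
      subst this
      simp [pvZipCols]
  | succ m ih =>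
    intro rows hne hhead hall
    match rows with
    | r :: rs =>
      simp only [List.headD_cons] at hhead
      have hnoempty : ¬ (r :: rs).any (fun c => c.isEmpty) = true := by
        simp only [List.any_eq_true, not_exists, not_and]
        intro c hc
        have := hall c hc
        simp only [List.isEmpty_iff]
        intro h; subst h; simp at this
      rw [pvZipCols, if_neg hnoempty]
      rw [ih ((r :: rs).map (fun c => c.tail))]
      · rw [List.range_succ_eq_map]
        have hhead' : ∀ (c : List Char), c.headD ' ' = c.getD 0 ' ' := by
          intro c; cases c <;> rfl
        have htail : ∀ (c : List Char) (j : Nat), c.tail.getD j ' ' = c.getD (j + 1) ' ' := by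
          intro c j; cases c <;> simp
        simp only [List.map_cons, List.map_map, hhead', htail]
        congr 1
        apply List.map_congr_left
        intro j _
        simp [Function.comp_def]
      · simp
      · simp only [List.map_cons, List.headD_cons, List.length_tail]
        omega
      · intro t ht
        simp only [List.map_cons, List.mem_cons, List.mem_map] at ht
        rcases ht with h | ⟨c, hc, h⟩
        · subst h; simp only [List.length_tail]; omega
        · subst h
          have := hall c (List.mem_cons_of_mem _ hc)
          simp only [List.length_tail]; omega

-- A's inner loop value in terms of a countP
theorem pvValue_eq (xs : List String) (column : Int) :
    ∀ (v : Int),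
      xs.foldl (fun v row => if PySem.Str.pyGet? row column == some '1' then v + 1 else v - 1) v
      = v + 2 * (xs.countP (fun row => PySem.Str.pyGet? row column == some '1') : Int) - xs.length := by
  induction xs with
  | nil => intro v; simp
  | cons r xs ih =>
    intro v
    simp only [List.foldl_cons, List.countP_cons, List.length_cons]
    by_cases h : (PySem.Str.pyGet? r column == some '1') = true
    · rw [if_pos h, if_pos h, ih]; push_cast; ring
    · rw [if_neg h, if_neg h, ih]; push_cast; ring

-- pyGet? at a valid nonnegative index is getD
theorem pvGet_eq_getD (s : String) (j : Nat) (hj : j < s.toList.length) :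
    PySem.Str.pyGet? s (j : Int) = some (s.toList.getD j ' ') := by
  have h1 : PySem.Str.pyGet? s (j : Int) = PySem.Chars.pyGet? s.toList (j : Int) := by
    simp [PySem.Str.pyGet?]
  rw [h1]
  have hj' : j < s.length := by rw [← String.length_toList]; exact hj
  simp [PySem.Chars.pyGet?, PySem.List.pyGet?, PySem.List.pyIdx?, hj', List.getD_eq_getElem?_getD]

-- the joint loop invariant: folding A's column loop and B's column loop in step
theorem pvLoop_eq (xs : List String) (js : List Int)
    (hcols : ∀ j ∈ js, 0 ≤ j ∧ ∀ r ∈ xs, j < (r.toList.length : Int)) :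
    ∀ (gl el : List String) (g : Int) (c : Nat),
      pvBinToDecimal gl = g → pvBinToDecimal el = ((1 <<< c) - 1 : Int) - g →
      (letI resA := js.foldl
          (fun (ge : List String × List String) column =>
            if pvValueA xs column > 0 then (ge.1 ++ ["1"], ge.2 ++ ["0"])
            else (ge.1 ++ ["0"], ge.2 ++ ["1"])) (gl, el)
       letI resB := (js.map (fun j => xs.map (fun r => r.toList.getD j.toNat ' '))).foldl
          (fun (gc : Int × Nat) col =>
            (gc.1 * 2 + (if 2 * (PySem.List.count col '1' : Int) > (xs.length : Int) then 1 else 0),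
             gc.2 + 1)) (g, c)
       pvBinToDecimal resA.1 = resB.1 ∧
       pvBinToDecimal resA.2 = ((1 <<< resB.2) - 1 : Int) - resB.1) := by
  induction js with
  | nil => intro gl el g c hg he; exact ⟨hg, he⟩
  | cons j js ih =>
    intro gl el g c hg he
    obtain ⟨hj0, hjlen⟩ := hcols j (List.mem_cons_self ..)
    simp only [List.map_cons, List.foldl_cons]
    have hjcast : ((j.toNat : Int)) = j := Int.toNat_of_nonneg hj0
    -- the column condition agrees
    have hcount : (PySem.List.count (xs.map (fun r => r.toList.getD j.toNat ' ')) '1' : Int)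
        = (xs.countP (fun row => PySem.Str.pyGet? row j == some '1') : Int) := by
      congr 1
      simp only [PySem.List.count, List.count_eq_countP, List.countP_map]
      apply List.countP_congr
      intro r hr
      simp only [Function.comp]
      have hlt : j.toNat < r.toList.length := by
        have := hjlen r hr; omega
      rw [show PySem.Str.pyGet? r j = PySem.Str.pyGet? r ((j.toNat : Int)) by rw [hjcast]]
      rw [pvGet_eq_getD r j.toNat hlt]
      simp [BEq.comm]
    have hcond : (pvValueA xs j > 0)
        ↔ (2 * (PySem.List.count (xs.map (fun r => r.toList.getD j.toNat ' ')) '1' : Int) > (xs.length : Int)) := by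
      rw [hcount]
      unfold pvValueA
      rw [pvValue_eq]
      omega
    have hpow : ∀ k : Nat, (((1 <<< (k + 1) : Nat) : Int)) = 2 * ((1 <<< k : Nat) : Int) := by
      intro k
      push_cast [Nat.shiftLeft_eq, pow_succ]
      ring
    have ih' := ih (fun j' hj' => hcols j' (List.mem_cons_of_mem _ hj'))
    by_cases hbit : pvValueA xs j > 0
    · rw [if_pos hbit, if_pos (hcond.mp hbit)]
      refine ih' (gl ++ ["1"]) (el ++ ["0"]) (g * 2 + 1) (c + 1) ?_ ?_
      · rw [pvBtd_append, hg, show (PySem.Int.ofStr? "1").getD 0 = 1 from rfl]; ring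
      · rw [pvBtd_append, he, hpow, show (PySem.Int.ofStr? "0").getD 0 = 0 from rfl]; ring
    · have hb2 := fun h => hbit (hcond.mpr h)
      rw [if_neg hbit, if_neg hb2]
      refine ih' (gl ++ ["0"]) (el ++ ["1"]) (g * 2 + 0) (c + 1) ?_ ?_
      · rw [pvBtd_append, hg, show (PySem.Int.ofStr? "0").getD 0 = 0 from rfl]; ring
      · rw [pvBtd_append, he, hpow, show (PySem.Int.ofStr? "1").getD 0 = 1 from rfl]; ring

-- ===== VERDICT (by name: the statement is the Claim_ definition above) =====
theorem get_gamma_and_epsilon_rate_spec : Claim_equal_get_gamma_and_epsilon_rate := by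
  intro xs _ hpre
  obtain ⟨hne, hlen⟩ := hpre
  unfold Spec_get_gamma_and_epsilon_rate
  match xs, hne with
  | x :: rest, _ =>
    set xs := x :: rest with hxs
    set m := x.toList.length with hm
    have hget0 : PySem.List.pyGet? xs 0 = some x := by
      simp [hxs, PySem.List.pyGet?, PySem.List.pyIdx?]
    have hzip : pvZipCols (xs.map String.toList)
        = (List.range m).map (fun j => xs.map (fun r => r.toList.getD j ' ')) := by
      rw [pvZipCols_eq m]
      · simp [List.map_map, Function.comp]
      · simp [hxs]
      · simp only [hxs, List.map_cons, List.headD_cons, hm, String.length_toList]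
      · intro r hr
        simp only [List.mem_map] at hr
        obtain ⟨s, hs, rfl⟩ := hr
        have := hlen s hs
        simpa [hxs] using this
    have hBlist : (List.range m).map (fun j => xs.map (fun r => r.toList.getD j ' '))
        = (PySem.List.pyRange 0 (m : Int) 1).map
            (fun j => xs.map (fun r => r.toList.getD j.toNat ' ')) := by
      rw [PySem.List.pyRange_one, List.map_map]
      apply List.map_congr_left
      intro k _
      simp
    have hcols : ∀ j ∈ PySem.List.pyRange 0 (m : Int) 1,
        0 ≤ j ∧ ∀ r ∈ xs, j < (r.toList.length : Int) := by
      intro j hj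
      rw [PySem.List.mem_pyRange_one] at hj
      refine ⟨hj.1, fun r hr => ?_⟩
      have h1 := hlen r hr
      simp only [hxs, List.headD_cons, ← hm] at h1
      have h2 : (m : Int) ≤ (r.toList.length : Int) := by exact_mod_cast h1
      omega
    have hmain := pvLoop_eq xs (PySem.List.pyRange 0 (m : Int) 1) hcols
      [] [] 0 0 rfl (by norm_num [pvBinToDecimal])
    rw [← hBlist, ← hzip] at hmain
    unfold get_gamma_and_epsilon_rate get_gamma_and_epsilon_rate_alt
    simp only [hget0, Option.getD_some, ← hm]
    exact Prod.ext hmain.1 hmain.2
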